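-- pv_equiv track=rewrite | github.com/Arsen1302/Code-copy-detector | TestData/solutions/problem_74_5.py | solution_74_5
-- ===== SOURCE A (Python) =====
-- from typing import List
--
-- def solution_74_5(numbers: List[int], target: int) -> List[int]:
--
--     for left in range(len(numbers) -1): #1
--         right = len(numbers) - 1 #2
--         while left < right: #3
--             temp_sum = numbers[left] + numbers[right] #4
--             if temp_sum > target:  #5
--                 right -= 1 #6
--             elif temp_sum < target: #7
--                 left +=1 #8
--             else:
--                 return [left+1, right+1] #9
-- ===== SOURCE B (Python) =====
-- def solution_74_5(numbers, target):
--     n = len(numbers)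
--     hit_from = {}  # corner (l, r) -> the pair its staircase walk reaches, or None
--
--     def walk(l, r):
--         trail = []
--         found = None
--         while l < r and (l, r) not in hit_from:
--             trail.append((l, r))
--             s = numbers[l] + numbers[r]
--             if s == target:
--                 found = (l, r)
--                 break
--             if s > target:
--                 r -= 1
--             else:
--                 l += 1
--         else:
--             if l < r:
--                 found = hit_from[(l, r)]
--         for cell in trail:
--             hit_from[cell] = found
--         return found
--
--     for start in range(n - 1):
--         found = walk(start, n - 1)
--         if found is not None:
--             return [found[0] + 1, found[1] + 1]
--     return None
-- ===== Notes on version B (the rewrite author's own statement) =====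
-- stated objective: alternative
-- what changed: A blindly re-steps a fresh staircase walk from every start index; B evaluates the same walk recurrence top-down with a memo dictionary of corner outcomes, so a walk stops as soon as it reaches a corner whose outcome is already known (trading memory and per-step dictionary work for shared walk suffixes).
import Mathlib
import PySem

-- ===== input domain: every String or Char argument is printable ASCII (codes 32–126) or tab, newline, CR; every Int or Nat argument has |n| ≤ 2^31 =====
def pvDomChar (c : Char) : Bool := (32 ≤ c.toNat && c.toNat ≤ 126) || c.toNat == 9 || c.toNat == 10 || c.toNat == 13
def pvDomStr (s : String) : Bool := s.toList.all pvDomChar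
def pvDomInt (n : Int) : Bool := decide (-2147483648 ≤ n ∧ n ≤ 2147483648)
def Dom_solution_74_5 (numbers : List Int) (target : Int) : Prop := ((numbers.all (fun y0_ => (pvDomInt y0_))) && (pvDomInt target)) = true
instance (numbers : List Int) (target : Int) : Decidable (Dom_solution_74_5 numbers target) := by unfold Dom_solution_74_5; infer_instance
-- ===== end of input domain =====

-- B evaluates the staircase-walk recurrence top-down with a memo of corner outcomes
-- (walks stop when they reach an already-resolved corner) instead of blindly
-- re-stepping every walk; alternative algorithm, same worst-case cost.


-- ===== PORT A =====
-- the 'while left < right' loop of A; the pyGet? none-branches are unreachable (left, right stay in range)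
def pvInnerA (numbers : List Int) (target : Int) (left right : Int) : Option (List Int) :=
  if _h : left < right then
    match PySem.List.pyGet? numbers left, PySem.List.pyGet? numbers right with
    | some a, some b =>
      if a + b > target then pvInnerA numbers target left (right - 1)
      else if a + b < target then pvInnerA numbers target (left + 1) right
      else some [left + 1, right + 1]
    | _, _ => none
  else none
termination_by (right - left).toNat
decreasing_by all_goals omega

-- the 'for left in range(len(numbers) - 1)' loop: return the first hit, else fall off (None)
def pvOuterA (numbers : List Int) (target : Int) : List Int → Option (List Int)
  | [] => none
  | s :: rest =>
    match pvInnerA numbers target s ((numbers.length : Int) - 1) with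
    | some v => some v
    | none => pvOuterA numbers target rest

def solution_74_5 (numbers : List Int) (target : Int) : Option (List Int) :=
  pvOuterA numbers target (PySem.List.pyRange 0 ((numbers.length : Int) - 1) 1)

-- ===== PORT B =====
-- the closing 'for cell in trail: hit_from[cell] = found' loop of B's walk
def pvWriteback (trail : List (Int × Int)) (v : Option (Int × Int))
    (memo : PySem.Dict (Int × Int) (Option (Int × Int))) :
    PySem.Dict (Int × Int) (Option (Int × Int)) :=
  trail.foldl (fun d c => d.insert c v) memo

-- B's 'walk' helper: returns (found, updated memo); numbers[l], numbers[r] are in range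
-- whenever read (0 ≤ l < r ≤ n-1 at every step), so the .getD 0 default is never used — exact
def pvWalk (numbers : List Int) (target : Int) (l r : Int) (trail : List (Int × Int))
    (memo : PySem.Dict (Int × Int) (Option (Int × Int))) :
    Option (Int × Int) × PySem.Dict (Int × Int) (Option (Int × Int)) :=
  if _h : l < r then
    match memo.get? (l, r) with
    | some v => (v, pvWriteback trail v memo)
    | none =>
      let s := (PySem.List.pyGet? numbers l).getD 0 + (PySem.List.pyGet? numbers r).getD 0
      if s = target then (some (l, r), pvWriteback (trail ++ [(l, r)]) (some (l, r)) memo)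
      else if s > target then pvWalk numbers target l (r - 1) (trail ++ [(l, r)]) memo
      else pvWalk numbers target (l + 1) r (trail ++ [(l, r)]) memo
  else (none, pvWriteback trail none memo)
termination_by (r - l).toNat
decreasing_by all_goals omega

-- B's 'for start in range(n - 1)' loop, threading the memo
def pvLoopB (numbers : List Int) (target : Int) :
    List Int → PySem.Dict (Int × Int) (Option (Int × Int)) → Option (List Int)
  | [], _ => none
  | s :: rest, memo =>
    let res := pvWalk numbers target s ((numbers.length : Int) - 1) [] memo
    match res.1 with
    | some p => some [p.1 + 1, p.2 + 1]
    | none => pvLoopB numbers target rest res.2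

def solution_74_5_alt (numbers : List Int) (target : Int) : Option (List Int) :=
  pvLoopB numbers target (PySem.List.pyRange 0 ((numbers.length : Int) - 1) 1) PySem.Dict.empty

-- ===== PRECONDITION & SPEC =====
def Spec_solution_74_5 (numbers : List Int) (target : Int) (out : Option (List Int)) : Prop := out = solution_74_5_alt numbers target
instance (numbers : List Int) (target : Int) (out : Option (List Int)) : Decidable (Spec_solution_74_5 numbers target out) := by unfold Spec_solution_74_5; infer_instance

-- ===== CLAIM (what is proved, stated in full; the proofs are below) =====
def Claim_equal_solution_74_5 : Prop := ∀ (numbers : List Int) (target : Int), Dom_solution_74_5 numbers target → Spec_solution_74_5 numbers target (solution_74_5 numbers target)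

-- ===== LEMMAS AND PROOFS =====

-- the common specification: the staircase walk from (l, r), as an index pair
def pvSearch (numbers : List Int) (target : Int) (l r : Int) : Option (Int × Int) :=
  if _h : l < r then
    match PySem.List.pyGet? numbers l, PySem.List.pyGet? numbers r with
    | some a, some b =>
      if a + b > target then pvSearch numbers target l (r - 1)
      else if a + b < target then pvSearch numbers target (l + 1) r
      else some (l, r)
    | _, _ => none
  else none
termination_by (r - l).toNat
decreasing_by all_goals omega

theorem pvInnerA_eq_search (numbers : List Int) (target : Int) (l r : Int) :
    pvInnerA numbers target l r
      = (pvSearch numbers target l r).map (fun p => [p.1 + 1, p.2 + 1]) := by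
  fun_induction pvSearch numbers target l r with
  | case1 l r h a b ha hb hgt ih => rw [pvInnerA]; simp [h, ha, hb, hgt, ih]
  | case2 l r h a b ha hb hgt hlt ih => rw [pvInnerA]; simp [h, ha, hb, hgt, hlt, ih]
  | case3 l r h a b ha hb hgt hlt => rw [pvInnerA]; simp [h, ha, hb, hgt, hlt]
  | case4 l r h hx => rw [pvInnerA]; simp only [dif_pos h]; rfl
  | case5 l r h => rw [pvInnerA]; simp [h]

theorem pyGet_some (xs : List Int) (i : Int) (h0 : 0 ≤ i) (h : i < (xs.length : Int)) :
    PySem.List.pyGet? xs i = some (xs.getD i.toNat 0) := by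
  simp [PySem.List.pyGet?, PySem.List.pyIdx?, h0, h]

-- the memo invariant: every stored entry is its corner's true walk outcome
def pvInv (numbers : List Int) (target : Int)
    (memo : PySem.Dict (Int × Int) (Option (Int × Int))) : Prop :=
  ∀ k v, memo.get? k = some v → v = pvSearch numbers target k.1 k.2

theorem pvWriteback_inv (numbers : List Int) (target : Int) (v : Option (Int × Int)) :
    ∀ (trail : List (Int × Int)) (memo : PySem.Dict (Int × Int) (Option (Int × Int))),
      pvInv numbers target memo →
      (∀ c ∈ trail, pvSearch numbers target c.1 c.2 = v) →
      pvInv numbers target (pvWriteback trail v memo) := by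
  intro trail
  induction trail with
  | nil => intro memo hmemo _; simpa [pvWriteback] using hmemo
  | cons c cs ih =>
    intro memo hmemo htrail
    simp only [pvWriteback, List.foldl_cons]
    refine ih _ ?_ ?_
    · intro k w hk
      rw [PySem.Dict.get?_insert] at hk
      split_ifs at hk with hkc
      · obtain rfl : v = w := Option.some_inj.mp hk
        rw [hkc]
        exact (htrail c (List.mem_cons_self ..)).symm
      · exact hmemo k w hk
    · intro c' hc'
      exact htrail c' (List.mem_cons_of_mem _ hc')

-- one unfolding of the walk recurrence at an in-range corner
theorem pvSearch_step (numbers : List Int) (target : Int) (l r a b : Int) (h : l < r)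
    (ha : PySem.List.pyGet? numbers l = some a) (hb : PySem.List.pyGet? numbers r = some b) :
    pvSearch numbers target l r =
      if a + b > target then pvSearch numbers target l (r - 1)
      else if a + b < target then pvSearch numbers target (l + 1) r
      else some (l, r) := by
  rw [pvSearch, dif_pos h, ha, hb]

theorem pvWalk_eq (numbers : List Int) (target : Int)
    (memo : PySem.Dict (Int × Int) (Option (Int × Int))) :
    ∀ (l r : Int) (trail : List (Int × Int)),
      0 ≤ l → r < (numbers.length : Int) →
      pvInv numbers target memo →
      (∀ c ∈ trail, pvSearch numbers target c.1 c.2 = pvSearch numbers target l r) →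
      (pvWalk numbers target l r trail memo).1 = pvSearch numbers target l r ∧
      pvInv numbers target (pvWalk numbers target l r trail memo).2 := by
  intro l r trail
  fun_induction pvWalk numbers target l r trail memo with
  | case1 l r trail h v hv =>
    intro _ _ hmemo htrail
    have hvv := hmemo (l, r) v hv
    exact ⟨hvv, pvWriteback_inv _ _ _ _ _ hmemo (fun c hc => by rw [htrail c hc, hvv])⟩
  | case2 l r trail h hget s heq =>
    intro hl hr hmemo htrail
    have ha := pyGet_some numbers l hl (by omega)
    have hb := pyGet_some numbers r (by omega) hr
    have heq' : (PySem.List.pyGet? numbers l).getD 0 + (PySem.List.pyGet? numbers r).getD 0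
        = target := heq
    rw [ha, hb] at heq'
    simp only [Option.getD_some] at heq'
    have hs : pvSearch numbers target l r = some (l, r) := by
      rw [pvSearch_step numbers target l r _ _ h ha hb, if_neg (by omega), if_neg (by omega)]
    refine ⟨hs.symm, pvWriteback_inv _ _ _ _ _ hmemo ?_⟩
    intro c hc
    rcases List.mem_append.mp hc with hc | hc
    · rw [htrail c hc, hs]
    · simp only [List.mem_singleton] at hc; subst hc; simpa using hs
  | case3 l r trail h hget s hne hgt ih =>
    intro hl hr hmemo htrail
    have ha := pyGet_some numbers l hl (by omega)
    have hb := pyGet_some numbers r (by omega) hr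
    have hgt' : (PySem.List.pyGet? numbers l).getD 0 + (PySem.List.pyGet? numbers r).getD 0
        > target := hgt
    rw [ha, hb] at hgt'
    simp only [Option.getD_some] at hgt'
    have hstep : pvSearch numbers target l r = pvSearch numbers target l (r - 1) := by
      rw [pvSearch_step numbers target l r _ _ h ha hb, if_pos hgt']
    rw [hstep]
    apply ih hl (by omega) hmemo
    intro c hc
    rcases List.mem_append.mp hc with hc | hc
    · rw [htrail c hc, hstep]
    · simp only [List.mem_singleton] at hc; subst hc; simpa using hstep
  | case4 l r trail h hget s hne hngt ih =>
    intro hl hr hmemo htrail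
    have ha := pyGet_some numbers l hl (by omega)
    have hb := pyGet_some numbers r (by omega) hr
    have hne' : ¬((PySem.List.pyGet? numbers l).getD 0 + (PySem.List.pyGet? numbers r).getD 0
        = target) := hne
    have hngt' : ¬((PySem.List.pyGet? numbers l).getD 0 + (PySem.List.pyGet? numbers r).getD 0
        > target) := hngt
    rw [ha, hb] at hne' hngt'
    simp only [Option.getD_some] at hne' hngt'
    have hlt : numbers.getD l.toNat 0 + numbers.getD r.toNat 0 < target := by omega
    have hstep : pvSearch numbers target l r = pvSearch numbers target (l + 1) r := by
      rw [pvSearch_step numbers target l r _ _ h ha hb, if_neg (by omega), if_pos hlt]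
    rw [hstep]
    apply ih (by omega) hr hmemo
    intro c hc
    rcases List.mem_append.mp hc with hc | hc
    · rw [htrail c hc, hstep]
    · simp only [List.mem_singleton] at hc; subst hc; simpa using hstep
  | case5 l r trail h =>
    intro _ _ hmemo htrail
    have hs : pvSearch numbers target l r = none := by rw [pvSearch, dif_neg h]
    exact ⟨hs.symm, pvWriteback_inv _ _ _ _ _ hmemo (fun c hc => by rw [htrail c hc, hs])⟩

theorem pvLoopB_eq (numbers : List Int) (target : Int) :
    ∀ (S : List Int) (memo : PySem.Dict (Int × Int) (Option (Int × Int))),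
      (∀ s ∈ S, 0 ≤ s) → pvInv numbers target memo →
      pvOuterA numbers target S = pvLoopB numbers target S memo := by
  intro S
  induction S with
  | nil => intro memo _ _; rfl
  | cons s rest ih =>
    intro memo hS hmemo
    have hwalk := pvWalk_eq numbers target memo s ((numbers.length : Int) - 1) []
      (hS s (List.mem_cons_self ..)) (by omega) hmemo (by simp)
    rw [pvOuterA, pvLoopB, pvInnerA_eq_search]
    simp only [hwalk.1]
    cases pvSearch numbers target s ((numbers.length : Int) - 1) with
    | none => exact ih _ (fun t ht => hS t (List.mem_cons_of_mem _ ht)) hwalk.2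
    | some p => rfl

-- ===== VERDICT (by name: the statement is the Claim_ definition above) =====
theorem solution_74_5_spec : Claim_equal_solution_74_5 := by
  intro numbers target _
  unfold Spec_solution_74_5 solution_74_5 solution_74_5_alt
  apply pvLoopB_eq
  · intro s hs
    exact (PySem.List.mem_pyRange_one.mp hs).1
  · intro k v hk
    rw [PySem.Dict.get?_empty] at hk
    cases hk
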